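-- pv_equiv track=rewrite | github.com/radiantchoi/DomesticAlgorithmTraining | Python3/프로그래머스/1/42840. 모의고사/모의고사.py | solution
-- ===== SOURCE A (Python) =====
-- def solution(answers):
--     a = [1, 2, 3, 4, 5]
--     b = [2, 1, 2, 3, 2, 4, 2, 5]
--     c = [3, 3, 1, 1, 2, 2, 4, 4, 5, 5]
--
--     scores = [0, 0, 0]
--
--     for i in range(len(answers)):
--         if answers[i] == a[i % 5]:
--             scores[0] += 1
--
--         if answers[i] == b[i % 8]:
--             scores[1] += 1
--
--         if answers[i] == c[i % 10]:
--             scores[2] += 1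
--
--     return [x[0] + 1 for x in enumerate(scores) if x[1] == max(scores)]
-- ===== SOURCE B (Python) =====
-- def solution(answers):
--     # The three patterns all repeat with period dividing 40, so one pass builds a
--     # histogram of (position mod 40, answer) pairs; each pattern's score is then
--     # read off the histogram in O(1) buckets, with no per-element pattern matching.
--     cnt = {}
--     for i, v in enumerate(answers):
--         k = (i % 40, v)
--         cnt[k] = cnt.get(k, 0) + 1
--     patterns = [[1, 2, 3, 4, 5],
--                 [2, 1, 2, 3, 2, 4, 2, 5],
--                 [3, 3, 1, 1, 2, 2, 4, 4, 5, 5]]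
--     scores = [sum(cnt.get((r, p[r % len(p)]), 0) for r in range(40))
--               for p in patterns]
--     best = max(scores)
--     return [k + 1 for k, s in enumerate(scores) if s == best]
-- ===== Notes on version B (the rewrite author's own statement) =====
-- stated objective: alternative
-- what changed: B builds a one-pass histogram of (index mod 40, answer) pairs (40 = lcm of the three pattern periods) and reads each pattern's score off the histogram as a 40-bucket lookup sum, instead of A's per-element comparison against each pattern.
import Mathlib
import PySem

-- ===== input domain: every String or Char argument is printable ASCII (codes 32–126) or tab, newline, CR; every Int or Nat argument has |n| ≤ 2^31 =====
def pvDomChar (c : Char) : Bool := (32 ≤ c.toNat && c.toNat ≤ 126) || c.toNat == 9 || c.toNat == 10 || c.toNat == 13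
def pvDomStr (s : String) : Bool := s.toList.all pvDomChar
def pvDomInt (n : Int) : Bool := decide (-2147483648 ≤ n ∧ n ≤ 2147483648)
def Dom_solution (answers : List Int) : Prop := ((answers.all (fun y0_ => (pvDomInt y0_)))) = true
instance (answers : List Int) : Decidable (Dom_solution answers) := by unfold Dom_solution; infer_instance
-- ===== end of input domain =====

-- B replaces A's per-element pattern matching by a one-pass (index mod 40, answer) histogram
-- from which each pattern's score is read off (alternative algorithm; same asymptotic cost).

-- ===== PORT A =====
-- A: one loop over indices, incrementing three score counters together.
def solution (answers : List Int) : List Int :=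
  let a : List Int := [1, 2, 3, 4, 5]
  let b : List Int := [2, 1, 2, 3, 2, 4, 2, 5]
  let c : List Int := [3, 3, 1, 1, 2, 2, 4, 4, 5, 5]
  let scores : Int × Int × Int :=
    (PySem.List.enumerate answers).foldl
      (fun s p =>
        ((if p.2 = PySem.List.pyGetD a (PySem.Int.mod p.1 5) 0 then s.1 + 1 else s.1),
         (if p.2 = PySem.List.pyGetD b (PySem.Int.mod p.1 8) 0 then s.2.1 + 1 else s.2.1),
         (if p.2 = PySem.List.pyGetD c (PySem.Int.mod p.1 10) 0 then s.2.2 + 1 else s.2.2)))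
      (0, 0, 0)
  let lst : List Int := [scores.1, scores.2.1, scores.2.2]
  let m : Int := (PySem.List.max? lst (fun x => x)).getD 0
  ((PySem.List.enumerate lst).filter (fun x => x.2 == m)).map (fun x => x.1 + 1)

-- ===== PORT B =====
-- B: histogram of (i % 40, answer) built in one pass; each score is a 40-bucket lookup sum.
def solution_alt (answers : List Int) : List Int :=
  let cnt : PySem.Dict (Int × Int) Int :=
    (PySem.List.enumerate answers).foldl
      (fun d e =>
        let k : Int × Int := (PySem.Int.mod e.1 40, e.2)
        d.insert k (d.getD k 0 + 1))
      PySem.Dict.empty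
  let patterns : List (List Int) :=
    [[1, 2, 3, 4, 5], [2, 1, 2, 3, 2, 4, 2, 5], [3, 3, 1, 1, 2, 2, 4, 4, 5, 5]]
  let scores : List Int := patterns.map (fun p =>
    ((PySem.List.pyRange 0 40 1).map
      (fun r => cnt.getD (r, PySem.List.pyGetD p (PySem.Int.mod r (p.length : Int)) 0) 0)).sum)
  let best : Int := (PySem.List.max? scores (fun x => x)).getD 0
  ((PySem.List.enumerate scores).filter (fun x => x.2 == best)).map (fun x => x.1 + 1)

-- ===== PRECONDITION & SPEC =====
def Spec_solution (answers : List Int) (out : List Int) : Prop := out = solution_alt answers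
instance (answers : List Int) (out : List Int) : Decidable (Spec_solution answers out) := by unfold Spec_solution; infer_instance

-- ===== CLAIM (what is proved, stated in full; the proofs are below) =====
def Claim_equal_solution : Prop := ∀ (answers : List Int), Dom_solution answers → Spec_solution answers (solution answers)

-- ===== LEMMAS AND PROOFS =====
-- The interleaved triple-counter fold equals three independent counting folds.
theorem foldl_tri {α : Type} (l : List α) (c0 c1 c2 : α → Prop)
    [DecidablePred c0] [DecidablePred c1] [DecidablePred c2] (s0 s1 s2 : Int) :
    l.foldl
      (fun (s : Int × Int × Int) p =>
        ((if c0 p then s.1 + 1 else s.1),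
         (if c1 p then s.2.1 + 1 else s.2.1),
         (if c2 p then s.2.2 + 1 else s.2.2))) (s0, s1, s2)
    = (l.foldl (fun a p => if c0 p then a + 1 else a) s0,
       l.foldl (fun a p => if c1 p then a + 1 else a) s1,
       l.foldl (fun a p => if c2 p then a + 1 else a) s2) := by
  induction l generalizing s0 s1 s2 with
  | nil => rfl
  | cons x t ih => simp only [List.foldl_cons]; exact ih _ _ _

theorem indicator_sum (i v : Int) (f : Int → Int) :
    ((PySem.List.pyRange 0 40 1).map
        (fun r => (if (PySem.Int.mod i 40, v) == (r, f r) then (1:Int) else 0))).sum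
    = if v == f (PySem.Int.mod i 40) then (1:Int) else 0 := by
  have h0 : 0 ≤ PySem.Int.mod i 40 := PySem.Int.mod_nonneg i (by norm_num)
  have h40 : PySem.Int.mod i 40 < 40 := PySem.Int.mod_lt i (by norm_num)
  set m := PySem.Int.mod i 40 with hm
  rw [PySem.List.sum_map_ite_one_zero]
  by_cases hv : v = f m
  · have hpred : (fun r => ((m, v) == (r, f r))) = (fun r => r == m) := by
      funext r
      by_cases hr : r = m
      · subst hr; rw [hv]; simp
      · have h1 : ((m, v) == (r, f r)) = false := by
          simp only [beq_eq_false_iff_ne, ne_eq, Prod.mk.injEq, not_and]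
          intro h; exact absurd h.symm hr
        have h2 : (r == m) = false := by simp [hr]
        rw [h1, h2]
    rw [hpred]
    have hmem : m ∈ PySem.List.pyRange 0 40 1 := PySem.List.mem_pyRange_one.mpr ⟨h0, h40⟩
    have hcnt : (PySem.List.pyRange 0 40 1).count m = 1 :=
      List.count_eq_one_of_mem (PySem.List.nodup_pyRange_one 0 40) hmem
    simp only [List.count] at hcnt
    simp [hcnt, hv]
  · have : (PySem.List.pyRange 0 40 1).countP (fun r => ((m, v) == (r, f r))) = 0 := by
      apply List.countP_eq_zero.mpr
      intro r _
      simp only [beq_eq_false_iff_ne, ne_eq, Prod.mk.injEq, not_and, Bool.not_eq_true]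
      intro h; subst h; exact fun hc => hv hc
    simp [this, hv]


theorem sum_count_residues (l : List (Int × Int)) (f : Int → Int) :
    ((PySem.List.pyRange 0 40 1).map
        (fun r => ((l.countP (fun e => (PySem.Int.mod e.1 40, e.2) == (r, f r)) : Nat) : Int))).sum
    = ((l.countP (fun e => e.2 == f (PySem.Int.mod e.1 40)) : Nat) : Int) := by
  induction l with
  | nil => simp
  | cons x t ih =>
    simp only [List.countP_cons]
    push_cast
    rw [PySem.List.sum_map_add_int (PySem.List.pyRange 0 40 1)
      (fun r => ((t.countP (fun e => (PySem.Int.mod e.1 40, e.2) == (r, f r)) : Nat) : Int))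
      (fun r => (if ((PySem.Int.mod x.1 40, x.2) == (r, f r)) then (1:Int) else 0))]
    rw [ih, indicator_sum x.1 x.2 f]


theorem score_eq (answers : List Int) (p : List Int) (L : Int)
    (hpos : 0 < L) (hdvd : L ∣ 40) :
    ((PySem.List.pyRange 0 40 1).map
      (fun r => ((PySem.List.enumerate answers).foldl
          (fun d e => d.insert (PySem.Int.mod e.1 40, e.2) (d.getD (PySem.Int.mod e.1 40, e.2) 0 + 1))
          (PySem.Dict.empty : PySem.Dict (Int × Int) Int)).getD
            (r, PySem.List.pyGetD p (PySem.Int.mod r L) 0) 0)).sum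
    = (PySem.List.enumerate answers).foldl
        (fun a e => if e.2 = PySem.List.pyGetD p (PySem.Int.mod e.1 L) 0 then a + 1 else a) 0 := by
  have hfold : (PySem.List.enumerate answers).foldl
      (fun d e => d.insert (PySem.Int.mod e.1 40, e.2) (d.getD (PySem.Int.mod e.1 40, e.2) 0 + 1))
      (PySem.Dict.empty : PySem.Dict (Int × Int) Int)
      = (((PySem.List.enumerate answers).map (fun e => (PySem.Int.mod e.1 40, e.2))).foldl
          (fun d k => d.insert k (d.getD k 0 + 1)) PySem.Dict.empty) :=
    by rw [List.foldl_map]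
  have h : (List.map (fun r => ((PySem.List.enumerate answers).foldl
          (fun d e => d.insert (PySem.Int.mod e.1 40, e.2) (d.getD (PySem.Int.mod e.1 40, e.2) 0 + 1))
          (PySem.Dict.empty : PySem.Dict (Int × Int) Int)).getD
            (r, PySem.List.pyGetD p (PySem.Int.mod r L) 0) 0)
        (PySem.List.pyRange 0 40 1))
      = List.map (fun r => ((((PySem.List.enumerate answers).map (fun e => (PySem.Int.mod e.1 40, e.2))).countP
            (fun k => k == (r, PySem.List.pyGetD p (PySem.Int.mod r L) 0)) : Nat) : Int))
        (PySem.List.pyRange 0 40 1) :=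
    List.map_congr_left (fun r _ => by
      rw [hfold, PySem.Dict.getD_foldl_insert_add_one, PySem.Dict.getD_empty, zero_add, List.count])
  rw [h]
  simp only [List.countP_map, Function.comp_def]
  rw [sum_count_residues (PySem.List.enumerate answers) (fun r => PySem.List.pyGetD p (PySem.Int.mod r L) 0)]
  have hmm : ∀ i : Int, PySem.Int.mod (PySem.Int.mod i 40) L = PySem.Int.mod i L := by
    intro i
    rw [PySem.Int.mod_eq_emod_of_pos (by norm_num : (0:Int) < 40),
        PySem.Int.mod_eq_emod_of_pos hpos, PySem.Int.mod_eq_emod_of_pos hpos]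
    exact Int.emod_emod_of_dvd i hdvd
  have hc := PySem.List.foldl_count_if
    (fun e : Int × Int => decide (e.2 = PySem.List.pyGetD p (PySem.Int.mod e.1 L) 0))
    (PySem.List.enumerate answers) 0
  simp only [decide_eq_true_eq] at hc
  rw [hc]
  simp only [hmm, zero_add]
  rfl

-- ===== VERDICT (by name: the statement is the Claim_ definition above) =====
theorem solution_spec : Claim_equal_solution := by
  intro answers _
  show solution answers = solution_alt answers
  simp only [solution, solution_alt, foldl_tri, List.map, List.length_cons, List.length_nil, Nat.reduceAdd,
    Nat.cast_ofNat]
  rw [score_eq answers [1,2,3,4,5] 5 (by norm_num) (by norm_num),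
      score_eq answers [2,1,2,3,2,4,2,5] 8 (by norm_num) (by norm_num),
      score_eq answers [3,3,1,1,2,2,4,4,5,5] 10 (by norm_num) (by norm_num)]
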